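-- pv_equiv track=rewrite | github.com/wuc567/Pattern-Mining | OWSP-Miner/Python/Miner.py | digui
-- ===== SOURCE A (Python) =====
-- def pdR(s,R):
--     for i in s:
--         if i not in R:
--             return False
--     return True
--
-- def diguipd(k,sample,R):
--     sup = 0
--     m = [[-1] for i in range(len(sample))]
--     ll = 0
--     i = 0
--     while i < len(k):
--         l = 0
--         for j in range(len(sample) - 1, -1, -1):
--             if j == 0 and k[i] == sample[j]:
--                 m[j][ll] = i
--             elif k[i] == sample[j] and j != 0 and m[j - 1][ll] != -1 and m[j][ll] == -1:
--                 if pdR(k[m[j - 1][ll] + 1:i], R) or m[j - 1][ll] + 1 == i: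
--                     m[j][ll] = i
--                 else:
--                     i = i - 1
--                     l = 1
--                 break
--         if l == 1 or m[len(sample) - 1][ll] != -1:
--             for j in range(len(sample)):
--                 m[j].append(-1)
--             if m[len(sample) - 1][ll] != -1:
--                 sup = sup + 1
--             ll = ll + 1
--         i = i + 1
--     return sup
--
-- def digui(newone,s,yuzhi,R,mui):
--     m = []
--     numone = []
--     before = []
--     after = []
--     for i in newone:
--         before.append(i[:-1])
--         after.append(i[1:len(i)])
--     for i in range(len(before)):
--         for j in range(len(after)):
--             if before[i]==after[j] and str(newone[j][:-1]+newone[i]) not in m: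
--                 mui = mui+1
--                 n = diguipd(s,str(newone[j][:-len(before[i])]+newone[i]),R)
--                 if n >= yuzhi:
--                     m.append(str(newone[j][:-len(before[i])]+newone[i]))
--                     numone.append(n)
--     if len(m):
--         return m,numone,0,mui
--     else:
--         return m,numone,1,mui
-- ===== SOURCE B (Python) =====
-- # Faster: group after-sequences by value in a dict (one pass) and look up each
-- # before[i]'s matching indices instead of A's O(n^2) all-pairs scan, test dedup
-- # membership against a set mirroring m, and memoize diguipd per sample string
-- # (A recomputes it for every pair yielding the same sample).
-- def pdR(s, R):
--     for i in s:
--         if i not in R: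
--             return False
--     return True
--
-- def diguipd(k, sample, R):
--     sup = 0
--     m = [[-1] for i in range(len(sample))]
--     ll = 0
--     i = 0
--     while i < len(k):
--         l = 0
--         for j in range(len(sample) - 1, -1, -1):
--             if j == 0 and k[i] == sample[j]:
--                 m[j][ll] = i
--             elif k[i] == sample[j] and j != 0 and m[j - 1][ll] != -1 and m[j][ll] == -1:
--                 if pdR(k[m[j - 1][ll] + 1:i], R) or m[j - 1][ll] + 1 == i:
--                     m[j][ll] = i
--                 else:
--                     i = i - 1
--                     l = 1
--                 break
--         if l == 1 or m[len(sample) - 1][ll] != -1: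
--             for j in range(len(sample)):
--                 m[j].append(-1)
--             if m[len(sample) - 1][ll] != -1:
--                 sup = sup + 1
--             ll = ll + 1
--         i = i + 1
--     return sup
--
-- def digui(newone, s, yuzhi, R, mui):
--     before = [t[:-1] for t in newone]
--     after = [t[1:] for t in newone]
--     buckets = {}
--     for j, a in enumerate(after):
--         buckets.setdefault(a, []).append(j)
--     m = []
--     mset = set()
--     cache = {}
--     numone = []
--     for i, b in enumerate(before):
--         for j in buckets.get(b, []):
--             cand = newone[j][:-1] + newone[i]
--             if cand in mset:
--                 continue
--             mui = mui + 1
--             sample = newone[j][:-len(b)] + newone[i]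
--             if sample in cache:
--                 n = cache[sample]
--             else:
--                 n = diguipd(s, sample, R)
--                 cache[sample] = n
--             if n >= yuzhi:
--                 m.append(sample)
--                 mset.add(sample)
--                 numone.append(n)
--     if len(m):
--         return m, numone, 0, mui
--     else:
--         return m, numone, 1, mui
-- ===== Notes on version B (the rewrite author's own statement) =====
-- stated objective: faster
-- what changed: A's O(n^2) all-pairs scan matching before[i] against after[j] (with a linear list-membership dedup test and a fresh diguipd run per pair) is replaced by a dict grouping the after-sequences by value so each before[i] looks up exactly its matching indices, a set mirroring m for the dedup test, and a per-sample memo for diguipd.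
import Mathlib
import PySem

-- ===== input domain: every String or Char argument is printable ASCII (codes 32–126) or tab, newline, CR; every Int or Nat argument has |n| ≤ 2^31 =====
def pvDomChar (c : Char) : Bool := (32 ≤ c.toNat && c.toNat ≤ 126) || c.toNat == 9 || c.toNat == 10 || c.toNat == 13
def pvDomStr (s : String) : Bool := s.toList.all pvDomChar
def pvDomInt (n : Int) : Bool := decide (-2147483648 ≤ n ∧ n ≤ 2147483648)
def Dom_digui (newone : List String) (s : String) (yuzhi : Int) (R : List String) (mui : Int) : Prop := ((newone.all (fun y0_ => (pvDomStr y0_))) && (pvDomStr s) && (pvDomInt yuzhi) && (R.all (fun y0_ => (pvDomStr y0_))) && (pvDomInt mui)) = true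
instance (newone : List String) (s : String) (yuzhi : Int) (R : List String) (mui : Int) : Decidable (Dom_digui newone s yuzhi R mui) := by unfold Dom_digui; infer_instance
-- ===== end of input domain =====

-- B (objective: faster, measured) replaces A's O(n^2) all-pairs join by a dict
-- grouping the `after` sequences (bucket lookup per `before[i]`), a set mirroring
-- m for the dedup test, and a per-sample memo for the support counter diguipd
-- (which is itself the same helper, shared by both ports).

-- ===== PORT A =====
-- shared helpers: pdR and diguipd, transliterated from the Python helpers
-- (both Source A and Source B contain this identical helper code)
def pdR : List Char → List String → Bool
  | [], _ => true
  | c :: rest, R => if R.contains (String.ofList [c]) then pdR rest R else false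

-- m[j][ll] read/write (indices in range wherever the Python runs without raising)
def getM (m : List (List Int)) (j ll : Nat) : Int := (m.getD j []).getD ll (-1)
def setM (m : List (List Int)) (j ll : Nat) (v : Int) : List (List Int) :=
  m.set j ((m.getD j []).set ll v)

-- the `for j in range(len(sample)-1, -1, -1)` loop of diguipd; first arg is j+1
-- (0 = loop finished); returns (m, l) at break/end of the loop
def dgInner (k sample : List Char) (R : List String) (ll i : Nat) :
    Nat → List (List Int) → List (List Int) × Bool
  | 0, m => (m, false)
  | jf+1, m =>
      if jf = 0 ∧ k.getD i ' ' = sample.getD jf ' ' then (setM m jf ll (Int.ofNat i), false)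
      else if k.getD i ' ' = sample.getD jf ' ' ∧ jf ≠ 0 ∧ getM m (jf-1) ll ≠ -1 ∧ getM m jf ll = -1 then
        if pdR (PySem.List.slice k (some (getM m (jf-1) ll + 1)) (some (Int.ofNat i))) R = true
            ∨ getM m (jf-1) ll + 1 = Int.ofNat i
        then (setM m jf ll (Int.ofNat i), false)
        else (m, true)
      else dgInner k sample R ll i jf m

-- the `while i < len(k)` loop of diguipd; the fuel (first argument) only makes the
-- loop total: the Python loop runs at most 2*len(k) iterations (i advances, except
-- that each l==1 step keeps i and resets the column, after which l==1 cannot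
-- immediately recur), so the fuel below is never exhausted
def dgLoop (k sample : List Char) (R : List String) :
    Nat → List (List Int) → Nat → Int → Nat → Int
  | 0, _, _, sup, _ => sup
  | fuel+1, m, ll, sup, i =>
      if i < k.length then
        let r := dgInner k sample R ll i sample.length m
        if r.2 = true ∨ getM r.1 (sample.length - 1) ll ≠ -1 then
          dgLoop k sample R fuel (r.1.map (fun row => row ++ [-1])) (ll+1)
            (if getM r.1 (sample.length - 1) ll ≠ -1 then sup + 1 else sup)
            (if r.2 then i else i+1)
        else dgLoop k sample R fuel r.1 ll sup (i+1)
      else sup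

def diguipd (k sample : List Char) (R : List String) : Int :=
  dgLoop k sample R (2*k.length+1) (List.replicate sample.length [-1]) 0 0 0

def digui (newone : List String) (s : String) (yuzhi : Int) (R : List String) (mui : Int) :
    List String × List Int × Int × Int :=
  let nl := newone.map String.toList
  let ba := nl.foldl (fun (p : List (List Char) × List (List Char)) t =>
      (p.1 ++ [PySem.List.slice t none (some (-1))],
       p.2 ++ [PySem.List.slice t (some 1) (some (PySem.List.len t))])) ([], [])
  let st := (PySem.List.pyRange 0 (PySem.List.len ba.1) 1).foldl (fun st0 i =>
      (PySem.List.pyRange 0 (PySem.List.len ba.2) 1).foldl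
        (fun (st1 : List (List Char) × List Int × Int) j =>
          if PySem.List.pyGetD ba.1 i [] = PySem.List.pyGetD ba.2 j [] ∧
             ¬ (PySem.List.slice (PySem.List.pyGetD nl j []) none (some (-1))
                 ++ PySem.List.pyGetD nl i []) ∈ st1.1 then
            let sample := PySem.List.slice (PySem.List.pyGetD nl j [])
                none (some (-(PySem.List.len (PySem.List.pyGetD ba.1 i []))))
                ++ PySem.List.pyGetD nl i []
            let n := diguipd s.toList sample R
            if n ≥ yuzhi then (st1.1 ++ [sample], st1.2.1 ++ [n], st1.2.2 + 1)
            else (st1.1, st1.2.1, st1.2.2 + 1)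
          else st1) st0) ([], [], mui)
  if st.1.length ≠ 0 then (st.1.map String.ofList, st.2.1, 0, st.2.2)
  else (st.1.map String.ofList, st.2.1, 1, st.2.2)

-- ===== PORT B =====
def digui_alt (newone : List String) (s : String) (yuzhi : Int) (R : List String) (mui : Int) :
    List String × List Int × Int × Int :=
  let nl := newone.map String.toList
  let before := nl.map (fun t => PySem.List.slice t none (some (-1)))
  let after := nl.map (fun t => PySem.List.slice t (some 1) none)
  let buckets := (PySem.List.enumerate after).foldl
      (fun d p => PySem.Dict.modify d p.2 ([] : List Int) (fun x => x ++ [p.1]))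
      PySem.Dict.empty
  let st := (PySem.List.enumerate before).foldl (fun st0 q =>
      (PySem.Dict.getD buckets q.2 []).foldl
        (fun (st1 : List (List Char) × PySem.Set (List Char) ×
                    PySem.Dict (List Char) Int × List Int × Int) j =>
          let cand := PySem.List.slice (PySem.List.pyGetD nl j []) none (some (-1))
              ++ PySem.List.pyGetD nl q.1 []
          if PySem.Set.contains st1.2.1 cand then st1
          else
            let sample := PySem.List.slice (PySem.List.pyGetD nl j [])
                none (some (-(PySem.List.len q.2))) ++ PySem.List.pyGetD nl q.1 []
            if PySem.Dict.contains st1.2.2.1 sample then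
              let n := PySem.Dict.getD st1.2.2.1 sample 0
              if n ≥ yuzhi then
                (st1.1 ++ [sample], PySem.Set.add st1.2.1 sample, st1.2.2.1,
                 st1.2.2.2.1 ++ [n], st1.2.2.2.2 + 1)
              else (st1.1, st1.2.1, st1.2.2.1, st1.2.2.2.1, st1.2.2.2.2 + 1)
            else
              let n := diguipd s.toList sample R
              let c := PySem.Dict.insert st1.2.2.1 sample n
              if n ≥ yuzhi then
                (st1.1 ++ [sample], PySem.Set.add st1.2.1 sample, c,
                 st1.2.2.2.1 ++ [n], st1.2.2.2.2 + 1)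
              else (st1.1, st1.2.1, c, st1.2.2.2.1, st1.2.2.2.2 + 1)) st0)
      ([], PySem.Set.empty, PySem.Dict.empty, [], mui)
  if st.1.length ≠ 0 then (st.1.map String.ofList, st.2.2.2.1, 0, st.2.2.2.2)
  else (st.1.map String.ofList, st.2.2.2.1, 1, st.2.2.2.2)

-- ===== PRECONDITION & SPEC =====
-- Pre_ excludes exactly the inputs on which the Python A raises IndexError: s nonempty
-- with "" among newone (diguipd is then reached with an empty sample and evaluates
-- m[-1] on the empty list m); Source B raises on exactly the same inputs.
def Pre_digui (newone : List String) (s : String) (yuzhi : Int) (R : List String) (mui : Int) : Prop :=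
  s = "" ∨ "" ∉ newone
instance (newone : List String) (s : String) (yuzhi : Int) (R : List String) (mui : Int) : Decidable (Pre_digui newone s yuzhi R mui) := by unfold Pre_digui; infer_instance
def pvWitness_digui : List String × String × Int × List String × Int := (["ab", "bc"], "ab", 1, ["a", "b"], 0)

def Spec_digui (newone : List String) (s : String) (yuzhi : Int) (R : List String) (mui : Int) (out : List String × List Int × Int × Int) : Prop := out = digui_alt newone s yuzhi R mui
instance (newone : List String) (s : String) (yuzhi : Int) (R : List String) (mui : Int) (out : List String × List Int × Int × Int) : Decidable (Spec_digui newone s yuzhi R mui out) := by unfold Spec_digui; infer_instance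

-- ===== CLAIM (what is proved, stated in full; the proofs are below) =====
def Claim_equal_digui : Prop := ∀ (newone : List String) (s : String) (yuzhi : Int) (R : List String) (mui : Int), Dom_digui newone s yuzhi R mui → Pre_digui newone s yuzhi R mui → Spec_digui newone s yuzhi R mui (digui newone s yuzhi R mui)

-- ===== LEMMAS AND PROOFS =====

-- t[1:len(t)] and t[1:] are the same slice
lemma slice_one_len (t : List Char) :
    PySem.List.slice t (some 1) (some ((t.length : Int))) = PySem.List.slice t (some 1) none := by
  rw [PySem.List.slice_from_one,
    PySem.List.slice_toNat _ (by norm_num) (by positivity)]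
  simp [List.take_of_length_le]

-- A's append-to-two-lists loop builds exactly B's two maps
lemma ba_eq (nl : List (List Char)) :
    nl.foldl (fun (p : List (List Char) × List (List Char)) t =>
      (p.1 ++ [PySem.List.slice t none (some (-1))],
       p.2 ++ [PySem.List.slice t (some 1) (some (PySem.List.len t))])) ([], [])
    = (nl.map (fun t => PySem.List.slice t none (some (-1))),
       nl.map (fun t => PySem.List.slice t (some 1) none)) := by
  refine Eq.trans (PySem.List.foldl_prod_mk
      (fun a t => a ++ [PySem.List.slice t none (some (-1))])
      (fun a t => a ++ [PySem.List.slice t (some 1) (some (PySem.List.len t))]) nl [] []) ?_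
  simp only [PySem.List.foldl_append_singleton_eq_map, List.nil_append, PySem.List.len_eq,
    slice_one_len]

-- the grouping dict's bucket for c is the ascending list of indices j with after[j] = c
lemma bucket_eq (after : List (List Char)) (c : List Char) :
    ((PySem.List.enumerate after).foldl
      (fun d p => PySem.Dict.modify d p.2 ([] : List Int) (fun x => x ++ [p.1]))
      PySem.Dict.empty).getD c []
    = (PySem.List.pyRange 0 (PySem.List.len after) 1).filter
        (fun j => PySem.List.pyGetD after j [] == c) := by
  have h : (PySem.List.enumerate after).foldl
      (fun d p => PySem.Dict.modify d p.2 ([] : List Int) (fun x => x ++ [p.1]))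
      PySem.Dict.empty
      = ((PySem.List.enumerate after).map (fun p => (p.2, p.1))).foldl
        (fun d q => PySem.Dict.modify d q.1 ([] : List Int) (fun x => x ++ [q.2]))
        PySem.Dict.empty := by rw [List.foldl_map]
  rw [h, PySem.Dict.getD_foldl_modify_append]
  rw [PySem.List.enumerate_eq_map_pyRange after []]
  simp [List.filter_map, List.map_map, Function.comp_def]

-- generic fold simulation along a state relation
lemma foldl_rel {α σ₁ σ₂ : Type} (Rel : σ₁ → σ₂ → Prop) (f : σ₁ → α → σ₁) (g : σ₂ → α → σ₂)
    (l : List α) (h : ∀ s t x, Rel s t → Rel (f s x) (g t x)) :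
    ∀ s t, Rel s t → Rel (l.foldl f s) (l.foldl g t) := by
  induction l with
  | nil => intro s t hst; exact hst
  | cons x xs ih => intro s t hst; exact ih _ _ (h _ _ _ hst)

-- B's state extends A's by the dedup set (always ofList of m) and the diguipd cache
-- (only ever holding correct diguipd values)
def SimRel (sL : List Char) (R : List String) (sa : List (List Char) × List Int × Int)
    (sb : List (List Char) × PySem.Set (List Char) ×
          PySem.Dict (List Char) Int × List Int × Int) : Prop :=
  sb.1 = sa.1 ∧ sb.2.1 = PySem.Set.ofList sa.1 ∧ sb.2.2.2.1 = sa.2.1 ∧ sb.2.2.2.2 = sa.2.2 ∧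
  ∀ key v, sb.2.2.1.get? key = some v → v = diguipd sL key R

-- Set.add after an append is ofList of the appended list
lemma ofList_append_singleton (m : List (List Char)) (x : List Char) :
    PySem.Set.ofList (m ++ [x]) = PySem.Set.add (PySem.Set.ofList m) x := by
  simp [PySem.Set.ofList_eq_foldl, List.foldl_append]


-- the heart of the proof: B's dict-bucket double loop simulates A's all-pairs
-- double loop under SimRel
set_option maxRecDepth 8192 in
lemma main_fold (nl before after : List (List Char)) (sL : List Char)
    (yuzhi : Int) (R : List String) (mui : Int) :
    SimRel sL R
      ((PySem.List.pyRange 0 (PySem.List.len before) 1).foldl (fun st0 i =>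
        (PySem.List.pyRange 0 (PySem.List.len after) 1).foldl
          (fun (st1 : List (List Char) × List Int × Int) j =>
            if PySem.List.pyGetD before i [] = PySem.List.pyGetD after j [] ∧
               PySem.List.slice (PySem.List.pyGetD nl j []) none (some (-1))
                   ++ PySem.List.pyGetD nl i [] ∉ st1.1 then
              let sample := PySem.List.slice (PySem.List.pyGetD nl j [])
                  none (some (-(PySem.List.len (PySem.List.pyGetD before i []))))
                  ++ PySem.List.pyGetD nl i []
              let n := diguipd sL sample R
              if n ≥ yuzhi then (st1.1 ++ [sample], st1.2.1 ++ [n], st1.2.2 + 1)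
              else (st1.1, st1.2.1, st1.2.2 + 1)
            else st1) st0) ([], [], mui))
      ((PySem.List.enumerate before).foldl (fun st0 q =>
        (PySem.Dict.getD ((PySem.List.enumerate after).foldl
            (fun d p => PySem.Dict.modify d p.2 ([] : List Int) (fun x => x ++ [p.1]))
            PySem.Dict.empty) q.2 []).foldl
          (fun (st1 : List (List Char) × PySem.Set (List Char) ×
                      PySem.Dict (List Char) Int × List Int × Int) j =>
            let cand := PySem.List.slice (PySem.List.pyGetD nl j []) none (some (-1))
                ++ PySem.List.pyGetD nl q.1 []
            if PySem.Set.contains st1.2.1 cand then st1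
            else
              let sample := PySem.List.slice (PySem.List.pyGetD nl j [])
                  none (some (-(PySem.List.len q.2))) ++ PySem.List.pyGetD nl q.1 []
              if PySem.Dict.contains st1.2.2.1 sample then
                let n := PySem.Dict.getD st1.2.2.1 sample 0
                if n ≥ yuzhi then
                  (st1.1 ++ [sample], PySem.Set.add st1.2.1 sample, st1.2.2.1,
                   st1.2.2.2.1 ++ [n], st1.2.2.2.2 + 1)
                else (st1.1, st1.2.1, st1.2.2.1, st1.2.2.2.1, st1.2.2.2.2 + 1)
              else
                let n := diguipd sL sample R
                let c := PySem.Dict.insert st1.2.2.1 sample n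
                if n ≥ yuzhi then
                  (st1.1 ++ [sample], PySem.Set.add st1.2.1 sample, c,
                   st1.2.2.2.1 ++ [n], st1.2.2.2.2 + 1)
                else (st1.1, st1.2.1, c, st1.2.2.2.1, st1.2.2.2.2 + 1)) st0)
        ([], PySem.Set.empty, PySem.Dict.empty, [], mui)) := by
  rw [PySem.List.enumerate_eq_map_pyRange before [], List.foldl_map]
  refine foldl_rel (SimRel sL R) _ _ _ ?_ ([], [], mui)
      ([], PySem.Set.empty, PySem.Dict.empty, [], mui)
      ⟨rfl, rfl, rfl, rfl, by intro key v h; simp [PySem.Dict.get?_empty] at h⟩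
  intro sa sb i hrel
  simp only []
  rw [bucket_eq, List.foldl_filter]
  refine foldl_rel (SimRel sL R) _ _ _ ?_ sa sb hrel
  intro s1 t1 j hr
  obtain ⟨am, an, au⟩ := s1
  obtain ⟨bm, bs, bc, bn, bu⟩ := t1
  obtain ⟨h1, h2, h3, h4, h5⟩ := hr
  simp only [] at h1 h2 h3 h4 h5
  subst h1 h2 h3 h4
  simp only []
  by_cases hm : PySem.List.pyGetD after j ([] : List Char) = PySem.List.pyGetD before i []
  · simp only [hm, BEq.rfl, if_true, true_and]
    by_cases hc : (PySem.List.slice (PySem.List.pyGetD nl j []) none (some (-1))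
        ++ PySem.List.pyGetD nl i []) ∈ bm
    · simp [hc]
      exact ⟨rfl, rfl, rfl, rfl, h5⟩
    · have hcs : PySem.Set.contains (PySem.Set.ofList bm)
          (PySem.List.slice (PySem.List.pyGetD nl j []) none (some (-1))
            ++ PySem.List.pyGetD nl i []) = false := by
        by_contra h
        exact hc ((PySem.Set.mem_ofList _ _).mp ((PySem.Set.contains_iff _ _).mp
          (by simpa using h)))
      simp only [hcs, Bool.false_eq_true, if_false, hc, not_false_iff]
      by_cases hct : PySem.Dict.contains bc
          (PySem.List.slice (PySem.List.pyGetD nl j [])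
            none (some (-(PySem.List.len (PySem.List.pyGetD before i []))))
            ++ PySem.List.pyGetD nl i []) = true
      · have hv0 : (bc.get? (PySem.List.slice (PySem.List.pyGetD nl j [])
            none (some (-(PySem.List.len (PySem.List.pyGetD before i []))))
            ++ PySem.List.pyGetD nl i [])).isSome = true := by
          rw [← PySem.Dict.contains_eq_isSome_get?]; exact hct
        obtain ⟨v, hv⟩ := Option.isSome_iff_exists.mp hv0
        have hn : PySem.Dict.getD bc
            (PySem.List.slice (PySem.List.pyGetD nl j [])
              none (some (-(PySem.List.len (PySem.List.pyGetD before i []))))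
              ++ PySem.List.pyGetD nl i []) 0
            = diguipd sL (PySem.List.slice (PySem.List.pyGetD nl j [])
              none (some (-(PySem.List.len (PySem.List.pyGetD before i []))))
              ++ PySem.List.pyGetD nl i []) R := by
          rw [PySem.Dict.getD_eq_get?_getD, hv]
          exact h5 _ _ hv
        simp only [hct, if_true, hn]
        split_ifs <;> first
          | exact ⟨rfl, by rw [ofList_append_singleton], rfl, rfl, h5⟩
          | exact ⟨rfl, rfl, rfl, rfl, h5⟩
      · have hctf : PySem.Dict.contains bc
            (PySem.List.slice (PySem.List.pyGetD nl j [])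
              none (some (-(PySem.List.len (PySem.List.pyGetD before i []))))
              ++ PySem.List.pyGetD nl i []) = false := by
          simpa using hct
        simp only [hctf, Bool.false_eq_true, if_false]
        have h5' : ∀ key v, (PySem.Dict.insert bc
            (PySem.List.slice (PySem.List.pyGetD nl j [])
              none (some (-(PySem.List.len (PySem.List.pyGetD before i []))))
              ++ PySem.List.pyGetD nl i [])
            (diguipd sL (PySem.List.slice (PySem.List.pyGetD nl j [])
              none (some (-(PySem.List.len (PySem.List.pyGetD before i []))))
              ++ PySem.List.pyGetD nl i []) R)).get? key = some v →
            v = diguipd sL key R := by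
          intro key v hkv
          rw [PySem.Dict.get?_insert] at hkv
          split_ifs at hkv with hk
          · cases hkv; subst hk; rfl
          · exact h5 _ _ hkv
        split_ifs <;> first
          | exact ⟨rfl, by rw [ofList_append_singleton], rfl, rfl, h5'⟩
          | exact ⟨rfl, rfl, rfl, rfl, h5'⟩
  · have hb : (PySem.List.pyGetD after j ([] : List Char)
        == PySem.List.pyGetD before i []) = false := by
      simpa using hm
    simp only [hb, Bool.false_eq_true, if_false]
    have hg : ¬ (PySem.List.pyGetD before i [] = PySem.List.pyGetD after j ([] : List Char) ∧
        PySem.List.slice (PySem.List.pyGetD nl j []) none (some (-1))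
            ++ PySem.List.pyGetD nl i [] ∉ bm) := by
      rintro ⟨hx, -⟩; exact hm hx.symm
    simp only [hg, if_false]
    exact ⟨rfl, rfl, rfl, rfl, h5⟩

-- ===== VERDICT (by name: the statement is the Claim_ definition above) =====
theorem digui_spec : Claim_equal_digui := by
  intro newone s yuzhi R mui _ _
  unfold Spec_digui digui digui_alt
  simp only [ba_eq]
  obtain ⟨h1, -, h3, h4, -⟩ := main_fold (newone.map String.toList)
    ((newone.map String.toList).map (fun t => PySem.List.slice t none (some (-1))))
    ((newone.map String.toList).map (fun t => PySem.List.slice t (some 1) none))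
    s.toList yuzhi R mui
  rw [h1, h3, h4]
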